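-- pv_equiv track=rewrite | github.com/weiboz10/medicalproject | autolabeler/medicalproj/framemarker.py | build_alternating_sequence
-- ===== SOURCE A (Python) =====
-- from typing import Iterable, List, Sequence, Tuple
--
-- def build_alternating_sequence(
--     maxima: Sequence[int], minima: Sequence[int]
-- ) -> List[Tuple[int, str]]:
--     """
--     Merge maxima/minima into an alternating sequence, starting with whichever comes first.
--     Returns list of (frame_index, label) where label is "brightest" or "dimmest".
--     """
--     maxima_sorted = sorted(maxima)
--     minima_sorted = sorted(minima)
--
--     if not maxima_sorted and not minima_sorted:
--         return []
--     if not maxima_sorted: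
--         return [(idx, "dimmest") for idx in minima_sorted]
--     if not minima_sorted:
--         return [(idx, "brightest") for idx in maxima_sorted]
--
--     next_max = 0
--     next_min = 0
--     sequence: List[Tuple[int, str]] = []
--
--     start_with_max = maxima_sorted[0] <= minima_sorted[0]
--     expecting_max = start_with_max
--
--     while next_max < len(maxima_sorted) or next_min < len(minima_sorted):
--         if expecting_max:
--             while next_max < len(maxima_sorted) and (
--                 sequence and maxima_sorted[next_max] <= sequence[-1][0]
--             ):
--                 next_max += 1
--             if next_max >= len(maxima_sorted):
--                 break
--             sequence.append((maxima_sorted[next_max], "brightest"))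
--             next_max += 1
--         else:
--             while next_min < len(minima_sorted) and (
--                 sequence and minima_sorted[next_min] <= sequence[-1][0]
--             ):
--                 next_min += 1
--             if next_min >= len(minima_sorted):
--                 break
--             sequence.append((minima_sorted[next_min], "dimmest"))
--             next_min += 1
--         expecting_max = not expecting_max
--
--     return sequence
-- ===== SOURCE B (Python) =====
-- from typing import List, Sequence, Tuple
--
-- def build_alternating_sequence(
--     maxima: Sequence[int], minima: Sequence[int]
-- ) -> List[Tuple[int, str]]:
--     """
--     Merge maxima/minima into an alternating sequence, starting with whichever comes first.
--     Returns list of (frame_index, label) where label is "brightest" or "dimmest".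
--     """
--     if not maxima and not minima:
--         return []
--     if not maxima:
--         return [(idx, "dimmest") for idx in sorted(minima)]
--     if not minima:
--         return [(idx, "brightest") for idx in sorted(maxima)]
--
--     merged = sorted(
--         [(i, "brightest") for i in maxima] + [(i, "dimmest") for i in minima]
--     )
--     expected = merged[0][1]
--     last = None
--     sequence: List[Tuple[int, str]] = []
--     for idx, label in merged:
--         if label == expected and (last is None or idx > last):
--             sequence.append((idx, label))
--             last = idx
--             expected = "dimmest" if expected == "brightest" else "brightest"
--     return sequence
-- ===== Notes on version B (the rewrite author's own statement) =====
-- stated objective: alternative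
-- what changed: A's two-pointer alternating merge with inner skip-while loops is replaced by building one combined sorted labeled list and filtering it in a single state-machine pass (expected label + last index).
import Mathlib
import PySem

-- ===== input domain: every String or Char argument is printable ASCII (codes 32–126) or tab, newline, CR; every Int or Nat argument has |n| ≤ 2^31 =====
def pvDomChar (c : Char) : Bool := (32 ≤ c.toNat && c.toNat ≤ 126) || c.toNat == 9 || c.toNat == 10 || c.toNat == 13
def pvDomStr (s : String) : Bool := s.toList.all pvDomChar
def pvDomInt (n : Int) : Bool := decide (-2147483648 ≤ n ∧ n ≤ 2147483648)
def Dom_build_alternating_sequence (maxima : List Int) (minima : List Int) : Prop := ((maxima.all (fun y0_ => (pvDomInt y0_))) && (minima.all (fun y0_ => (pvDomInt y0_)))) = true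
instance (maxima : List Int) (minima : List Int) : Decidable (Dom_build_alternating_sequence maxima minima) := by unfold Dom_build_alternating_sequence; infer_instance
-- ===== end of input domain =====

-- B replaces A's two-pointer alternating merge (with inner skip-while loops) by one combined
-- sorted labeled list filtered in a single state-machine pass (objective: alternative).

-- ===== PORT A =====
-- the inner skip-while: advance past candidates ≤ the last appended index (no skip while the sequence is empty)
def pvSkip (seqRev : List (Int × String)) (xs : List Int) : List Int :=
  match seqRev with
  | [] => xs
  | (l, _) :: _ => xs.dropWhile (fun x => decide (x ≤ l))

-- needed by pvALoop's termination proof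
lemma pvSkip_length (s : List (Int × String)) (xs : List Int) : (pvSkip s xs).length ≤ xs.length := by
  cases s with
  | nil => simp [pvSkip]
  | cons h t => obtain ⟨l, lbl⟩ := h; simpa [pvSkip] using List.length_dropWhile_le _ _

-- the while-loop of A; `seqRev` is `sequence` reversed (head = last appended element)
def pvALoop (ms ns : List Int) (expectingMax : Bool) (seqRev : List (Int × String)) : List (Int × String) :=
  if ms = [] ∧ ns = [] then seqRev.reverse
  else if expectingMax then
    let t := pvSkip seqRev ms
    if t = [] then seqRev.reverse
    else pvALoop t.tail ns false ((t.headD 0, "brightest") :: seqRev)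
  else
    let t := pvSkip seqRev ns
    if t = [] then seqRev.reverse
    else pvALoop ms t.tail true ((t.headD 0, "dimmest") :: seqRev)
termination_by ms.length + ns.length
decreasing_by
  · have h1 := pvSkip_length seqRev ms
    have h2 : (pvSkip seqRev ms).length ≠ 0 := by
      simpa [List.length_eq_zero_iff] using ‹¬ pvSkip seqRev ms = []›
    simp only [List.length_tail]; omega
  · have h1 := pvSkip_length seqRev ns
    have h2 : (pvSkip seqRev ns).length ≠ 0 := by
      simpa [List.length_eq_zero_iff] using ‹¬ pvSkip seqRev ns = []›
    simp only [List.length_tail]; omega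

def build_alternating_sequence (maxima : List Int) (minima : List Int) : List (Int × String) :=
  let ms := PySem.List.sorted maxima (fun x => x) false
  let ns := PySem.List.sorted minima (fun x => x) false
  if ms = [] ∧ ns = [] then []
  else if ms = [] then ns.map (fun i => (i, "dimmest"))
  else if ns = [] then ms.map (fun i => (i, "brightest"))
  else pvALoop ms ns (decide (ms.headD 0 ≤ ns.headD 0)) []

-- ===== PORT B =====
def pvFlip (expected : String) : String := if expected = "brightest" then "dimmest" else "brightest"

-- B's single filtering pass over the combined sorted labeled list
def pvBScan (merged : List (Int × String)) (expected : String) (last : Option Int)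
    (seq : List (Int × String)) : List (Int × String) :=
  match merged with
  | [] => seq
  | (idx, label) :: rest =>
    if label == expected && (match last with | none => true | some l => decide (l < idx)) then
      pvBScan rest (pvFlip expected) (some idx) (seq ++ [(idx, label)])
    else pvBScan rest expected last seq

def build_alternating_sequence_alt (maxima : List Int) (minima : List Int) : List (Int × String) :=
  if maxima = [] ∧ minima = [] then []
  else if maxima = [] then (PySem.List.sorted minima (fun x => x) false).map (fun i => (i, "dimmest"))
  else if minima = [] then (PySem.List.sorted maxima (fun x => x) false).map (fun i => (i, "brightest"))
  else
    let merged := PySem.List.sorted2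
      (maxima.map (fun i => (i, "brightest")) ++ minima.map (fun i => (i, "dimmest")))
      (fun p => p.1) (fun p => p.2) false
    match merged with
    | [] => []
    | (_, lab) :: _ => pvBScan merged lab none []

-- ===== PRECONDITION & SPEC =====
def Spec_build_alternating_sequence (maxima : List Int) (minima : List Int) (out : List (Int × String)) : Prop := out = build_alternating_sequence_alt maxima minima
instance (maxima : List Int) (minima : List Int) (out : List (Int × String)) : Decidable (Spec_build_alternating_sequence maxima minima out) := by unfold Spec_build_alternating_sequence; infer_instance

-- ===== CLAIM (what is proved, stated in full; the proofs are below) =====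
def Claim_equal_build_alternating_sequence : Prop := ∀ (maxima : List Int) (minima : List Int), Dom_build_alternating_sequence maxima minima → Spec_build_alternating_sequence maxima minima (build_alternating_sequence maxima minima)

-- ===== LEMMAS AND PROOFS =====
lemma pvBScan_acc (m : List (Int × String)) : ∀ (e : String) (l : Option Int) (s : List (Int × String)),
    pvBScan m e l s = s ++ pvBScan m e l [] := by
  induction m with
  | nil => intro e l s; simp [pvBScan]
  | cons p rest ih =>
    intro e l s
    obtain ⟨i, lab⟩ := p
    simp only [pvBScan]
    by_cases hc : (lab == e && (match l with | none => true | some x => decide (x < i))) = true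
    · rw [if_pos hc, if_pos hc, ih _ _ (s ++ [(i, lab)]), ih _ _ ([] ++ [(i, lab)])]; simp
    · rw [if_neg hc, if_neg hc, ih _ _ s]

lemma pvBScan_allb (ns : List Int) (l : Option Int) (acc : List (Int × String)) :
    pvBScan (ns.map (fun i => (i, "dimmest"))) "brightest" l acc = acc := by
  induction ns generalizing l acc with
  | nil => simp [pvBScan]
  | cons n rest ih => simp [pvBScan, ih]

lemma pvBScan_alld (ms : List Int) (l : Option Int) (acc : List (Int × String)) :
    pvBScan (ms.map (fun i => (i, "brightest"))) "dimmest" l acc = acc := by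
  induction ms generalizing l acc with
  | nil => simp [pvBScan]
  | cons n rest ih => simp [pvBScan, ih]

-- same-side drop: an expected-side candidate ≤ last is skipped
lemma pvALoop_dropMax (m l : Int) (ms ns : List Int) (s : String) (acc : List (Int × String))
    (hml : m ≤ l) :
    pvALoop (m :: ms) ns true ((l, s) :: acc) = pvALoop ms ns true ((l, s) :: acc) := by
  rw [pvALoop, pvALoop]
  have hskip : pvSkip ((l, s) :: acc) (m :: ms) = pvSkip ((l, s) :: acc) ms := by
    simp [pvSkip, List.dropWhile, hml]
  by_cases hg : ms = [] ∧ ns = []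
  · obtain ⟨h1, h2⟩ := hg
    subst h1; subst h2
    simp [pvSkip, List.dropWhile, hml]
  · have hg' : ¬ (m :: ms = [] ∧ ns = []) := by simp_all
    simp only [hg, hg', if_false, if_true, hskip]

lemma pvALoop_dropMin (n l : Int) (ms ns : List Int) (s : String) (acc : List (Int × String))
    (hnl : n ≤ l) :
    pvALoop ms (n :: ns) false ((l, s) :: acc) = pvALoop ms ns false ((l, s) :: acc) := by
  rw [pvALoop, pvALoop]
  have hskip : pvSkip ((l, s) :: acc) (n :: ns) = pvSkip ((l, s) :: acc) ns := by
    simp [pvSkip, List.dropWhile, hnl]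
  by_cases hg : ms = [] ∧ ns = []
  · obtain ⟨h1, h2⟩ := hg
    subst h1; subst h2
    simp [pvSkip, List.dropWhile, hnl]
  · have hg' : ¬ (ms = [] ∧ n :: ns = []) := by simp_all
    simp only [hg, hg', if_false, hskip]
    rfl

lemma pvSkip_headD_mem (sr : List (Int × String)) (xs : List Int) (ht : pvSkip sr xs ≠ []) :
    (pvSkip sr xs).headD 0 ∈ xs := by
  have h1 : (pvSkip sr xs).headD 0 ∈ pvSkip sr xs := by
    cases hx : pvSkip sr xs with
    | nil => exact absurd hx ht
    | cons a t => simp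
  have h2 : List.Sublist (pvSkip sr xs) xs := by
    cases sr with
    | nil => simp [pvSkip]
    | cons p t => obtain ⟨l, lbl⟩ := p; simpa [pvSkip] using List.dropWhile_sublist _
  exact h2.mem h1

lemma pvALoop_skipMinOp (m n : Int) (ms ns₂ : List Int) (sr : List (Int × String))
    (h : ∀ x ∈ m :: ms, n < x) :
    pvALoop (m :: ms) (n :: ns₂) true sr = pvALoop (m :: ms) ns₂ true sr := by
  rw [pvALoop, pvALoop]
  have hg1 : ¬ (m :: ms = [] ∧ n :: ns₂ = []) := by simp
  have hg2 : ¬ (m :: ms = [] ∧ ns₂ = []) := by simp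
  simp only [hg1, hg2, if_false, if_true]
  by_cases ht : pvSkip sr (m :: ms) = []
  · simp [ht]
  · simp only [ht, if_false]
    have hn : n < (pvSkip sr (m :: ms)).headD 0 := h _ (pvSkip_headD_mem sr _ ht)
    exact pvALoop_dropMin _ _ _ _ _ _ (le_of_lt hn)

lemma pvALoop_skipMaxOp (m n : Int) (ms₂ ns : List Int) (sr : List (Int × String))
    (h : ∀ y ∈ n :: ns, m ≤ y) :
    pvALoop (m :: ms₂) (n :: ns) false sr = pvALoop ms₂ (n :: ns) false sr := by
  rw [pvALoop, pvALoop]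
  have hg1 : ¬ (m :: ms₂ = [] ∧ n :: ns = []) := by simp
  have hg2 : ¬ (ms₂ = [] ∧ n :: ns = []) := by simp
  simp only [hg1, hg2, if_false]
  by_cases ht : pvSkip sr (n :: ns) = []
  · simp [ht]
  · simp only [ht, if_false]
    have hn : m ≤ (pvSkip sr (n :: ns)).headD 0 := h _ (pvSkip_headD_mem sr _ ht)
    exact pvALoop_dropMax _ _ _ _ _ _ hn

-- reference two-list merge: the combined sorted labeled list, recursively
def pvMerge : List Int → List Int → List (Int × String)
  | [], ns => ns.map (fun i => (i, "dimmest"))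
  | m :: ms, [] => (m :: ms).map (fun i => (i, "brightest"))
  | m :: ms, n :: ns =>
    if m ≤ n then (m, "brightest") :: pvMerge ms (n :: ns)
    else (n, "dimmest") :: pvMerge (m :: ms) ns

lemma pvMerge_nil_right (ms : List Int) : pvMerge ms [] = ms.map (fun i => (i, "brightest")) := by
  cases ms <;> simp [pvMerge]

-- core simulation: A's loop on the two sorted suffixes equals B's scan of their merge
lemma pvMain : ∀ (N : Nat) (ms ns : List Int), ms.length + ns.length ≤ N →
    ms.Pairwise (· ≤ ·) → ns.Pairwise (· ≤ ·) →
    ∀ (l : Int) (s : String) (acc : List (Int × String)) (exp : Bool),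
    pvALoop ms ns exp ((l, s) :: acc) =
      ((l, s) :: acc).reverse ++
        pvBScan (pvMerge ms ns) (if exp then "brightest" else "dimmest") (some l) [] := by
  intro N
  induction N with
  | zero =>
    intro ms ns hlen _ _ l s acc exp
    have hms : ms = [] := by cases ms <;> simp_all
    have hns : ns = [] := by cases ns <;> simp_all
    subst hms; subst hns
    rw [pvALoop]; simp [pvMerge, pvBScan]
  | succ N ih =>
    intro ms ns hlen hms hns l s acc exp
    cases exp with
    | true =>
      cases ms with
      | nil =>
        rw [pvALoop]
        by_cases hn : ns = []
        · subst hn; simp [pvMerge, pvBScan]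
        · simp [hn, pvSkip, pvMerge, pvBScan_allb]
      | cons m ms₂ =>
        rcases List.pairwise_cons.mp hms with ⟨hm2, hms₂⟩
        by_cases hcase : ∃ n ns₂, ns = n :: ns₂ ∧ n < m
        · obtain ⟨n, ns₂, rfl, hnm⟩ := hcase
          rcases List.pairwise_cons.mp hns with ⟨hn2, hns₂⟩
          rw [pvALoop_skipMinOp m n ms₂ ns₂ _ (by
            intro x hx
            rcases List.mem_cons.mp hx with rfl | hx
            · exact hnm
            · exact lt_of_lt_of_le hnm (hm2 x hx))]
          rw [ih (m :: ms₂) ns₂ (by simp at hlen ⊢; omega) hms hns₂ l s acc true]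
          have hmerge : pvMerge (m :: ms₂) (n :: ns₂) = (n, "dimmest") :: pvMerge (m :: ms₂) ns₂ := by
            simp [pvMerge, show ¬ m ≤ n by omega]
          rw [hmerge]
          simp [pvBScan]
        · -- merge head is (m, "brightest")
          have hmerge : pvMerge (m :: ms₂) ns = (m, "brightest") :: pvMerge ms₂ ns := by
            cases ns with
            | nil => simp [pvMerge, pvMerge_nil_right]
            | cons n ns₂ =>
              have hmn : m ≤ n := by
                by_contra hc
                exact hcase ⟨n, ns₂, rfl, by omega⟩
              simp [pvMerge, hmn]
          rw [hmerge]
          by_cases hml : m ≤ l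
          · rw [pvALoop_dropMax m l ms₂ ns s acc hml]
            rw [ih ms₂ ns (by simp at hlen ⊢; omega) hms₂ hns l s acc true]
            simp [pvBScan, show ¬ l < m by omega]
          · rw [pvALoop]
            have hg : ¬ (m :: ms₂ = [] ∧ ns = []) := by simp
            have hskip : pvSkip ((l, s) :: acc) (m :: ms₂) = m :: ms₂ := by
              simp [pvSkip, List.dropWhile, show ¬ m ≤ l by omega]
            simp only [hg, if_false, if_true, hskip]
            have hne : ¬ (m :: ms₂ = []) := by simp
            simp only [hne, if_false, List.tail_cons, List.headD_cons]
            rw [ih ms₂ ns (by simp at hlen ⊢; omega) hms₂ hns m "brightest" ((l, s) :: acc) false]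
            simp [pvBScan, show l < m by omega, pvFlip, pvBScan_acc (pvMerge ms₂ ns) "dimmest" (some m) [(m, "brightest")]]
    | false =>
      cases ns with
      | nil =>
        rw [pvALoop]
        by_cases hm : ms = []
        · subst hm; simp [pvMerge, pvBScan]
        · simp [hm, pvSkip, pvMerge_nil_right, pvBScan_alld]
      | cons n ns₂ =>
        rcases List.pairwise_cons.mp hns with ⟨hn2, hns₂⟩
        by_cases hcase : ∃ m ms₂, ms = m :: ms₂ ∧ m ≤ n
        · obtain ⟨m, ms₂, rfl, hmn⟩ := hcase
          rcases List.pairwise_cons.mp hms with ⟨hm2, hms₂⟩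
          rw [pvALoop_skipMaxOp m n ms₂ ns₂ _ (by
            intro y hy
            rcases List.mem_cons.mp hy with rfl | hy
            · exact hmn
            · exact le_trans hmn (hn2 y hy))]
          rw [ih ms₂ (n :: ns₂) (by simp at hlen ⊢; omega) hms₂ hns l s acc false]
          have hmerge : pvMerge (m :: ms₂) (n :: ns₂) = (m, "brightest") :: pvMerge ms₂ (n :: ns₂) := by
            simp [pvMerge, hmn]
          rw [hmerge]
          simp [pvBScan]
        · -- merge head is (n, "dimmest")
          have hmerge : pvMerge ms (n :: ns₂) = (n, "dimmest") :: pvMerge ms ns₂ := by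
            cases ms with
            | nil => simp [pvMerge]
            | cons m ms₂ =>
              have hnm : ¬ m ≤ n := by
                by_contra hc
                exact hcase ⟨m, ms₂, rfl, hc⟩
              simp [pvMerge, hnm]
          rw [hmerge]
          by_cases hnl : n ≤ l
          · rw [pvALoop_dropMin n l ms ns₂ s acc hnl]
            rw [ih ms ns₂ (by simp at hlen ⊢; omega) hms hns₂ l s acc false]
            simp [pvBScan, show ¬ l < n by omega]
          · rw [pvALoop]
            have hg : ¬ (ms = [] ∧ n :: ns₂ = []) := by simp
            have hskip : pvSkip ((l, s) :: acc) (n :: ns₂) = n :: ns₂ := by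
              simp [pvSkip, List.dropWhile, show ¬ n ≤ l by omega]
            simp only [hg, if_false, hskip]
            have hne : ¬ (n :: ns₂ = []) := by simp
            simp only [hne, if_false, Bool.false_eq_true, List.tail_cons, List.headD_cons]
            rw [ih ms ns₂ (by simp at hlen ⊢; omega) hms hns₂ n "dimmest" ((l, s) :: acc) true]
            simp [pvBScan, show l < n by omega, pvFlip, pvBScan_acc (pvMerge ms ns₂) "brightest" (some n) [(n, "dimmest")]]

-- characterisation of B's sorted2 call as pvMerge of the two sorted inputs
def pvR (a b : Int × String) : Prop := a.1 < b.1 ∨ (a.1 = b.1 ∧ a.2 ≤ b.2)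

def pvBf (a c : Int × String) : Bool :=
  decide (a.1 < c.1) || (!decide (c.1 < a.1) && decide (a.2 < c.2))

lemma pvSorted2_eq (xs : List (Int × String)) :
    PySem.List.sorted2 xs (fun p => p.1) (fun p => p.2) false =
      xs.foldl (fun acc x => PySem.List.insertBy pvBf x acc) [] := rfl

lemma pvBf_true {a c : Int × String} (h : pvBf a c = true) : pvR a c := by
  by_cases hi : a.1 < c.1
  · exact Or.inl hi
  · rw [pvBf, decide_eq_false hi, Bool.false_or, Bool.and_eq_true] at h
    obtain ⟨h1, h2⟩ := h
    have h1' : ¬ c.1 < a.1 := of_decide_eq_false (by rwa [Bool.not_eq_true'] at h1)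
    have h2' : a.2 < c.2 := of_decide_eq_true h2
    exact Or.inr ⟨by omega, le_of_lt h2'⟩

lemma pvBf_false {a c : Int × String} (h : pvBf a c = false) : pvR c a := by
  have h1 : ¬ a.1 < c.1 := by
    intro hl; rw [pvBf, decide_eq_true hl] at h; simp at h
  by_cases hci : c.1 < a.1
  · exact Or.inl hci
  · have h2 : ¬ a.2 < c.2 := by
      intro hl; rw [pvBf, decide_eq_true hl, decide_eq_false hci] at h; simp at h
    exact Or.inr ⟨by omega, not_lt.mp h2⟩

lemma pvR_trans {a b c : Int × String} (h1 : pvR a b) (h2 : pvR b c) : pvR a c := by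
  rcases h1 with h1 | ⟨h1, h1'⟩ <;> rcases h2 with h2 | ⟨h2, h2'⟩
  · exact Or.inl (lt_trans h1 h2)
  · exact Or.inl (h2 ▸ h1)
  · exact Or.inl (h1 ▸ h2)
  · exact Or.inr ⟨h1.trans h2, le_trans h1' h2'⟩

lemma pvR_antisymm {a b : Int × String} (h1 : pvR a b) (h2 : pvR b a) : a = b := by
  rcases h1 with h1 | ⟨h1, h1'⟩ <;> rcases h2 with h2 | ⟨h2, h2'⟩ <;>
    [omega; omega; omega; exact Prod.ext h1 (le_antisymm h1' h2')]

lemma pvInsertBy_pairwise (x : Int × String) :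
    ∀ zs : List (Int × String), zs.Pairwise pvR → (PySem.List.insertBy pvBf x zs).Pairwise pvR := by
  intro zs
  induction zs with
  | nil =>
    intro _
    rw [show PySem.List.insertBy pvBf x [] = [x] from rfl]
    simp
  | cons z zs ih =>
    intro hp
    rcases List.pairwise_cons.mp hp with ⟨hz, hzs⟩
    by_cases hb : pvBf x z = true
    · simp only [PySem.List.insertBy, hb, if_true]
      refine List.pairwise_cons.mpr ⟨?_, hp⟩
      intro y hy
      rcases List.mem_cons.mp hy with rfl | hy
      · exact pvBf_true hb
      · exact pvR_trans (pvBf_true hb) (hz y hy)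
    · simp only [PySem.List.insertBy, hb, if_false]
      refine List.pairwise_cons.mpr ⟨?_, ih hzs⟩
      intro y hy
      rcases (PySem.List.mem_insertBy pvBf x y zs).mp hy with rfl | hy
      · exact pvBf_false (Bool.not_eq_true _ ▸ hb)
      · exact hz y hy

lemma pvFoldl_pairwise (xs : List (Int × String)) :
    ∀ acc : List (Int × String), acc.Pairwise pvR →
      (xs.foldl (fun acc x => PySem.List.insertBy pvBf x acc) acc).Pairwise pvR := by
  induction xs with
  | nil => intro acc h; simpa using h
  | cons x xs ih => intro acc h; exact ih _ (pvInsertBy_pairwise x acc h)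

lemma pvMerge_perm (ms ns : List Int) :
    (pvMerge ms ns).Perm (ms.map (fun i => (i, "brightest")) ++ ns.map (fun i => (i, "dimmest"))) := by
  induction ms, ns using pvMerge.induct with
  | case1 ns => simp [pvMerge]
  | case2 m ms => simp [pvMerge]
  | case3 m ms n ns hmn ih =>
    simp only [pvMerge, hmn, if_true]
    exact (ih.cons _).trans (by simp)
  | case4 m ms n ns hmn ih =>
    simp only [pvMerge, hmn, if_false, List.map_cons]
    exact (ih.cons _).trans List.perm_middle.symm

lemma pvLabel_pair_R {i j : Int} (s : String) (h : i ≤ j) : pvR (i, s) (j, s) := by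
  rcases lt_or_eq_of_le h with h | h
  · exact Or.inl h
  · exact Or.inr ⟨h, le_refl _⟩

lemma pvBD_le : ("brightest" : String) ≤ "dimmest" :=
  le_of_lt (String.lt_iff_toList_lt.mpr (by decide))

lemma pvMerge_pairwise : ∀ ms ns : List Int,
    ms.Pairwise (· ≤ ·) → ns.Pairwise (· ≤ ·) → (pvMerge ms ns).Pairwise pvR := by
  intro ms ns
  induction ms, ns using pvMerge.induct with
  | case1 ns =>
    intro _ hns
    simp only [pvMerge]
    exact List.pairwise_map.mpr (hns.imp (fun h => pvLabel_pair_R _ h))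
  | case2 m ms =>
    intro hms _
    simp only [pvMerge]
    exact List.pairwise_map.mpr (hms.imp (fun h => pvLabel_pair_R _ h))
  | case3 m ms n ns hmn ih =>
    intro hms hns
    rcases List.pairwise_cons.mp hms with ⟨hm2, hms₂⟩
    simp only [pvMerge, hmn, if_true]
    refine List.pairwise_cons.mpr ⟨?_, ih hms₂ hns⟩
    intro y hy
    have hy' := (pvMerge_perm ms (n :: ns)).mem_iff.mp hy
    rcases List.mem_append.mp hy' with hy' | hy'
    · obtain ⟨i, hi, rfl⟩ := List.mem_map.mp hy'
      exact pvLabel_pair_R _ (hm2 i hi)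
    · obtain ⟨j, hj, rfl⟩ := List.mem_map.mp hy'
      have hnj : n ≤ j := by
        rcases List.mem_cons.mp hj with rfl | hj
        · exact le_refl _
        · exact (List.pairwise_cons.mp hns).1 j hj
      have hmj : m ≤ j := le_trans hmn hnj
      rcases lt_or_eq_of_le hmj with h | h
      · exact Or.inl h
      · exact Or.inr ⟨h, pvBD_le⟩
  | case4 m ms n ns hmn ih =>
    intro hms hns
    rcases List.pairwise_cons.mp hns with ⟨hn2, hns₂⟩
    simp only [pvMerge, hmn, if_false]
    refine List.pairwise_cons.mpr ⟨?_, ih hms hns₂⟩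
    intro y hy
    have hy' := (pvMerge_perm (m :: ms) ns).mem_iff.mp hy
    rcases List.mem_append.mp hy' with hy' | hy'
    · obtain ⟨i, hi, rfl⟩ := List.mem_map.mp hy'
      have hmi : m ≤ i := by
        rcases List.mem_cons.mp hi with rfl | hi
        · exact le_refl _
        · exact (List.pairwise_cons.mp hms).1 i hi
      exact Or.inl (lt_of_lt_of_le (by omega) hmi)
    · obtain ⟨j, hj, rfl⟩ := List.mem_map.mp hy'
      exact pvLabel_pair_R _ (hn2 j hj)

lemma pvMergedEq (maxima minima : List Int) :
    PySem.List.sorted2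
      (maxima.map (fun i => (i, "brightest")) ++ minima.map (fun i => (i, "dimmest")))
      (fun p => p.1) (fun p => p.2) false =
    pvMerge (PySem.List.sorted maxima (fun x => x) false)
            (PySem.List.sorted minima (fun x => x) false) := by
  refine List.eq_of_perm_of_sorted (fun a b _ _ h1 h2 => pvR_antisymm h1 h2) ?_ ?_ ?_
  · rw [pvSorted2_eq]
    exact pvFoldl_pairwise _ [] (by simp)
  · refine pvMerge_pairwise _ _ ?_ ?_
    · simpa using PySem.List.sorted_pairwise maxima (fun x => x)
    · simpa using PySem.List.sorted_pairwise minima (fun x => x)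
  · refine (PySem.List.sorted2_perm _ _ _ _).trans ?_
    refine List.Perm.symm ?_
    refine (pvMerge_perm _ _).trans ?_
    exact ((PySem.List.sorted_perm maxima _ _).map _).append ((PySem.List.sorted_perm minima _ _).map _)

lemma pvGlue (maxima minima : List Int) :
    build_alternating_sequence maxima minima = build_alternating_sequence_alt maxima minima := by
  by_cases hma : maxima = []
  · subst hma
    by_cases hmi : minima = []
    · subst hmi; rfl
    · have hns : PySem.List.sorted minima (fun x => x) false ≠ [] := by
        simpa [PySem.List.sorted_eq_nil_iff] using hmi
      simp [build_alternating_sequence, build_alternating_sequence_alt, hmi, hns,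
        show PySem.List.sorted ([] : List Int) (fun x => x) false = [] from rfl]
  · by_cases hmi : minima = []
    · subst hmi
      have hms : PySem.List.sorted maxima (fun x => x) false ≠ [] := by
        simpa [PySem.List.sorted_eq_nil_iff] using hma
      simp [build_alternating_sequence, build_alternating_sequence_alt, hma, hms,
        show PySem.List.sorted ([] : List Int) (fun x => x) false = [] from rfl]
    · -- both nonempty
      have hms : PySem.List.sorted maxima (fun x => x) false ≠ [] := by
        simpa [PySem.List.sorted_eq_nil_iff] using hma
      have hns : PySem.List.sorted minima (fun x => x) false ≠ [] := by
        simpa [PySem.List.sorted_eq_nil_iff] using hmi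
      obtain ⟨m, ms₂, hmseq⟩ : ∃ m ms₂, PySem.List.sorted maxima (fun x => x) false = m :: ms₂ :=
        List.exists_cons_of_ne_nil hms
      obtain ⟨n, ns₂, hnseq⟩ : ∃ n ns₂, PySem.List.sorted minima (fun x => x) false = n :: ns₂ :=
        List.exists_cons_of_ne_nil hns
      have hpm : (m :: ms₂).Pairwise (· ≤ ·) := by
        have := PySem.List.sorted_pairwise maxima (fun x => x)
        rw [hmseq] at this; simpa using this
      have hpn : (n :: ns₂).Pairwise (· ≤ ·) := by
        have := PySem.List.sorted_pairwise minima (fun x => x)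
        rw [hnseq] at this; simpa using this
      rcases List.pairwise_cons.mp hpm with ⟨_, hpm₂⟩
      rcases List.pairwise_cons.mp hpn with ⟨_, hpn₂⟩
      have hmerged := pvMergedEq maxima minima
      rw [hmseq, hnseq] at hmerged
      -- reduce A
      have hA : build_alternating_sequence maxima minima
          = pvALoop (m :: ms₂) (n :: ns₂) (decide (m ≤ n)) [] := by
        simp only [build_alternating_sequence, hmseq, hnseq]
        simp [hms, hns, hmseq, hnseq]
      -- reduce B
      have hB : build_alternating_sequence_alt maxima minima
          = pvBScan (pvMerge (m :: ms₂) (n :: ns₂))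
              (if m ≤ n then "brightest" else "dimmest") none [] := by
        simp only [build_alternating_sequence_alt, hma, hmi, if_false,
          show ¬ (maxima = [] ∧ minima = []) from by simp [hma]]
        rw [hmerged]
        by_cases hmn : m ≤ n
        · rw [show pvMerge (m :: ms₂) (n :: ns₂) = (m, "brightest") :: pvMerge ms₂ (n :: ns₂) from by
            simp [pvMerge, hmn]]
          simp [hmn, pvMerge, pvBScan]
        · rw [show pvMerge (m :: ms₂) (n :: ns₂) = (n, "dimmest") :: pvMerge (m :: ms₂) ns₂ from by
            simp [pvMerge, hmn]]
          simp [hmn, pvBScan]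
      rw [hA, hB]
      by_cases hmn : m ≤ n
      · rw [decide_eq_true hmn, if_pos hmn]
        rw [pvALoop]
        have hg : ¬ (m :: ms₂ = [] ∧ n :: ns₂ = []) := by simp
        simp only [hg, if_false, if_true, pvSkip, List.tail_cons, List.headD_cons,
          show ¬ (m :: ms₂ = []) from by simp, List.tail_cons]
        rw [pvMain (ms₂.length + (n :: ns₂).length) ms₂ (n :: ns₂) le_rfl hpm₂ hpn m "brightest" [] false]
        rw [show pvMerge (m :: ms₂) (n :: ns₂) = (m, "brightest") :: pvMerge ms₂ (n :: ns₂) from by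
          simp [pvMerge, hmn]]
        simp [pvBScan, pvFlip, pvBScan_acc (pvMerge ms₂ (n :: ns₂)) "dimmest" (some m) [(m, "brightest")]]
      · rw [decide_eq_false hmn, if_neg hmn]
        rw [pvALoop]
        have hg : ¬ (m :: ms₂ = [] ∧ n :: ns₂ = []) := by simp
        simp only [hg, if_false, Bool.false_eq_true, pvSkip, List.tail_cons, List.headD_cons,
          show ¬ (n :: ns₂ = []) from by simp]
        rw [pvMain ((m :: ms₂).length + ns₂.length) (m :: ms₂) ns₂ le_rfl hpm hpn₂ n "dimmest" [] true]
        rw [show pvMerge (m :: ms₂) (n :: ns₂) = (n, "dimmest") :: pvMerge (m :: ms₂) ns₂ from by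
          simp [pvMerge, hmn]]
        simp [pvBScan, pvFlip, pvBScan_acc (pvMerge (m :: ms₂) ns₂) "brightest" (some n) [(n, "dimmest")]]

-- ===== VERDICT (by name: the statement is the Claim_ definition above) =====
theorem build_alternating_sequence_spec : Claim_equal_build_alternating_sequence := by
  intro maxima minima _
  unfold Spec_build_alternating_sequence
  exact pvGlue maxima minima
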